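-- pv_equiv track=rewrite | github.com/RayZhang2024/SimSetup | diffraction/gsas_exp.py | _multiplicity
-- ===== SOURCE A (Python) =====
-- import itertools
--
-- def _multiplicity(h: int, k: int, l: int) -> int:
--     values = (h, k, l)
--     permutations = len(set(itertools.permutations(values, 3)))
--     sign_count = 1
--     for value in values:
--         if value != 0:
--             sign_count *= 2
--     return permutations * sign_count
-- ===== SOURCE B (Python) =====
-- def _multiplicity(h: int, k: int, l: int) -> int:
--     if h == k == l:
--         perm = 1
--     elif h == k or k == l or h == l:
--         perm = 3
--     else:
--         perm = 6
--     return perm * 2 ** ((h != 0) + (k != 0) + (l != 0))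
-- ===== Notes on version B (the rewrite author's own statement) =====
-- stated objective: simpler
-- what changed: B replaces A's enumeration of all 6 orderings and set-deduplication by a closed-form case analysis on which of h,k,l coincide (1/3/6 distinct permutations) times 2^(number of nonzero components).
import Mathlib
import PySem

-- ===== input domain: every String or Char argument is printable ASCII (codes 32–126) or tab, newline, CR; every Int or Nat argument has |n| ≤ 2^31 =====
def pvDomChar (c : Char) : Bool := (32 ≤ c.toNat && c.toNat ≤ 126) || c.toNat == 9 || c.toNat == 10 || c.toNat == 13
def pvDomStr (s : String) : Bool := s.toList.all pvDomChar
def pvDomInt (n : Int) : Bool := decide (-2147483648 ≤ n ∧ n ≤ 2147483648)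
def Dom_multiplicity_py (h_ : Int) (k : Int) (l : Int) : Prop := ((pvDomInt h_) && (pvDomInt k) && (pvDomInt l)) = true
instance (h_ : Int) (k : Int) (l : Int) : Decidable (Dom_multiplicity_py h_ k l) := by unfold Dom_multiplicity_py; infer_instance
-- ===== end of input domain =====

-- B replaces A's enumeration-and-dedup of all 6 orderings by a closed-form case analysis on which of h,k,l coincide (objective: simpler).

-- ===== PORT A =====
-- itertools.permutations((h,k,l), 3) yields the 6 orderings in index order (0,1,2),(0,2,1),(1,0,2),(1,2,0),(2,0,1),(2,1,0);
-- set(...) is PySem.Set.ofList; the sign loop is a fold over the tuple's values.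
def multiplicity_py (h_ : Int) (k : Int) (l : Int) : Int :=
  let values : List Int := [h_, k, l]
  let perms : List (Int × Int × Int) :=
    [(h_, k, l), (h_, l, k), (k, h_, l), (k, l, h_), (l, h_, k), (l, k, h_)]
  let permutations : Int := ((PySem.Set.ofList perms).length : Int)
  let sign_count : Int := values.foldl (fun s v => if v ≠ 0 then s * 2 else s) 1
  permutations * sign_count

-- ===== PORT B =====
def multiplicity_py_alt (h_ : Int) (k : Int) (l : Int) : Int :=
  let perm : Int :=
    if h_ = k ∧ k = l then 1
    else if h_ = k ∨ k = l ∨ h_ = l then 3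
    else 6
  perm * 2 ^ (((if h_ ≠ 0 then 1 else 0) + (if k ≠ 0 then 1 else 0) + (if l ≠ 0 then 1 else 0) : Nat))

-- ===== PRECONDITION & SPEC =====
def Spec_multiplicity_py (h_ : Int) (k : Int) (l : Int) (out : Int) : Prop := out = multiplicity_py_alt h_ k l
instance (h_ : Int) (k : Int) (l : Int) (out : Int) : Decidable (Spec_multiplicity_py h_ k l out) := by unfold Spec_multiplicity_py; infer_instance

-- ===== CLAIM (what is proved, stated in full; the proofs are below) =====
def Claim_equal_multiplicity_py : Prop := ∀ (h_ : Int) (k : Int) (l : Int), Dom_multiplicity_py h_ k l → Spec_multiplicity_py h_ k l (multiplicity_py h_ k l)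

-- ===== LEMMAS AND PROOFS =====

-- ===== VERDICT (by name: the statement is the Claim_ definition above) =====
theorem multiplicity_py_spec : Claim_equal_multiplicity_py := by
  intro h_ k l _
  unfold Spec_multiplicity_py multiplicity_py multiplicity_py_alt
  by_cases h1 : h_ = k <;> by_cases h2 : k = l <;> by_cases h3 : h_ = l <;>
    by_cases z1 : h_ = 0 <;> by_cases z2 : k = 0 <;> by_cases z3 : l = 0 <;>
    simp_all [PySem.Set.ofList, PySem.Set.add, PySem.Set.contains, List.foldl]
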